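-- pv_equiv track=rewrite | github.com/bus94/Study | Daily_Challenge/day12.py | solution
-- ===== SOURCE A (Python) =====
-- def solution(arr, query):
--     for i, q in enumerate(query):
--         if i % 2 == 0:
--             if q < len(arr):
--                 del(arr[q + 1:])
--         elif i % 2 != 0:
--             if q < len(arr):
--                 del(arr[:q])
--     return arr
-- ===== SOURCE B (Python) =====
-- def solution(arr, query):
--     lo, hi = 0, len(arr)
--     for i, q in enumerate(query):
--         L = hi - lo
--         if i % 2 == 0:
--             if q < L:
--                 s = q + 1
--                 if s < 0:
--                     s += L
--                 s = max(0, min(s, L))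
--                 hi = lo + s
--         else:
--             if q < L:
--                 s = q
--                 if s < 0:
--                     s += L
--                 s = max(0, min(s, L))
--                 lo += s
--     return arr[lo:hi]
-- ===== Notes on version B (the rewrite author's own statement) =====
-- stated objective: alternative
-- what changed: B never mutates or copies the list per query: it folds the queries into a pair of window offsets (lo, hi) replicating Python slice clamping, and slices the original list once at the end; note A truncates arr in place while B leaves it untouched (return values are equal).
import Mathlib
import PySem

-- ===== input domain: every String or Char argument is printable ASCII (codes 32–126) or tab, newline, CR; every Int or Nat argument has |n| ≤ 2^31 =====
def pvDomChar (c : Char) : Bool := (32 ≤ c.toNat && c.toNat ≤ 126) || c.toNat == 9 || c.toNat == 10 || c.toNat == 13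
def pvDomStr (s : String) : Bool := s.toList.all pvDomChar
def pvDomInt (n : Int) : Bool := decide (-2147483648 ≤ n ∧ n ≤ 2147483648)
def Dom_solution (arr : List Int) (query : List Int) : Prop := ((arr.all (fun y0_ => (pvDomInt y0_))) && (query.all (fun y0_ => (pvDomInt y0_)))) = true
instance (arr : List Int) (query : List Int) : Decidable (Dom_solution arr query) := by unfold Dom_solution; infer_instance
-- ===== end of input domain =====

-- B replaces A's per-query in-place list truncation by folding the queries into window offsets
-- (lo, hi) and slicing the original list once (objective: alternative; A mutates arr in place,
-- B does not — the equivalence proved is about the return value only).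


-- ===== PORT A =====
-- one iteration of A's loop body: the current list is truncated in place
def solutionStepA (a : List Int) (p : Int × Int) : List Int :=
  if PySem.Int.mod p.1 2 == 0 then
    if p.2 < (a.length : Int) then PySem.List.slice a none (some (p.2 + 1)) else a
  else
    if p.2 < (a.length : Int) then PySem.List.slice a (some p.2) none else a

def solution (arr : List Int) (query : List Int) : List Int :=
  (PySem.List.enumerate query).foldl solutionStepA arr

-- ===== PORT B =====
-- one iteration of B's loop: update the (lo, hi) window, replicating Python slice clamping
def solutionStepB (s : Int × Int) (p : Int × Int) : Int × Int :=
  let L := s.2 - s.1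
  if PySem.Int.mod p.1 2 == 0 then
    if p.2 < L then
      let s0 := p.2 + 1
      let s1 := if s0 < 0 then s0 + L else s0
      let s2 := max 0 (min s1 L)
      (s.1, s.1 + s2)
    else s
  else
    if p.2 < L then
      let s1 := if p.2 < 0 then p.2 + L else p.2
      let s2 := max 0 (min s1 L)
      (s.1 + s2, s.2)
    else s

def solution_alt (arr : List Int) (query : List Int) : List Int :=
  let r := (PySem.List.enumerate query).foldl solutionStepB (0, (arr.length : Int))
  PySem.List.slice arr (some r.1) (some r.2)

-- ===== PRECONDITION & SPEC =====
def Spec_solution (arr : List Int) (query : List Int) (out : List Int) : Prop := out = solution_alt arr query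
instance (arr : List Int) (query : List Int) (out : List Int) : Decidable (Spec_solution arr query out) := by unfold Spec_solution; infer_instance

-- ===== CLAIM (what is proved, stated in full; the proofs are below) =====
def Claim_equal_solution : Prop := ∀ (arr : List Int) (query : List Int), Dom_solution arr query → Spec_solution arr query (solution arr query)

-- ===== LEMMAS AND PROOFS =====

-- Python slice-index clamping, restated as integer arithmetic (matches B's max/min/wrap computation)
lemma clampIdx_cast (n : Nat) (i : Int) :
    ((PySem.List.clampIdx n i : Nat) : Int)
      = max 0 (min (if i < 0 then i + n else i) (n : Int)) := by
  simp only [PySem.List.clampIdx]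
  split_ifs <;> omega

lemma clampIdx_le_self (n : Nat) (i : Int) : PySem.List.clampIdx n i ≤ n := by
  simp only [PySem.List.clampIdx]
  split_ifs <;> omega

-- One loop iteration: if A's running list is the window arr[lo:hi] and B's state is (lo, hi),
-- the two step functions produce a corresponding window / offset pair again.
lemma solution_step (arr : List Int) (lo hi : Nat) (n q : Int)
    (h1 : lo ≤ hi) (h2 : hi ≤ arr.length) :
    ∃ lo' hi' : Nat, lo' ≤ hi' ∧ hi' ≤ arr.length ∧
      solutionStepB ((lo : Int), (hi : Int)) (n, q) = ((lo' : Int), (hi' : Int)) ∧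
      solutionStepA ((arr.drop lo).take (hi - lo)) (n, q)
        = (arr.drop lo').take (hi' - lo') := by
  have hlen : ((arr.drop lo).take (hi - lo)).length = hi - lo := by
    simp [List.length_take, List.length_drop]; omega
  by_cases hpar : (PySem.Int.mod n 2 == 0) = true
  · by_cases hq : q < (hi : Int) - (lo : Int)
    · -- even index, query in range: truncate the back (new hi)
      refine ⟨lo, lo + PySem.List.clampIdx (hi - lo) (q + 1), by omega,
        by have := clampIdx_le_self (hi - lo) (q + 1); omega, ?_, ?_⟩
      · simp only [solutionStepB, hpar, if_true]
        rw [if_pos hq]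
        simp only [Prod.mk.injEq, true_and]
        rw [Nat.cast_add, clampIdx_cast]
        split_ifs <;> omega
      · simp only [solutionStepA, hpar, if_true, hlen]
        rw [if_pos (by omega)]
        simp only [PySem.List.slice, hlen]
        rw [List.drop_zero, Nat.sub_zero, List.take_take]
        have := clampIdx_le_self (hi - lo) (q + 1)
        congr 1
        omega
    · -- even index, query out of range: nothing changes
      refine ⟨lo, hi, h1, h2, ?_, ?_⟩
      · simp only [solutionStepB, hpar, if_true]
        rw [if_neg hq]
      · simp only [solutionStepA, hpar, if_true, hlen]
        rw [if_neg (by omega)]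
  · by_cases hq : q < (hi : Int) - (lo : Int)
    · -- odd index, query in range: truncate the front (new lo)
      refine ⟨lo + PySem.List.clampIdx (hi - lo) q, hi,
        by have := clampIdx_le_self (hi - lo) q; omega, h2, ?_, ?_⟩
      · simp only [solutionStepB, hpar, if_false, Bool.false_eq_true]
        rw [if_pos hq]
        simp only [Prod.mk.injEq, and_true]
        rw [Nat.cast_add, clampIdx_cast]
        split_ifs <;> omega
      · simp only [solutionStepA, hpar, if_false, Bool.false_eq_true, hlen]
        rw [if_pos (by omega)]
        simp only [PySem.List.slice, hlen]
        rw [List.drop_take, List.drop_drop, List.take_take, min_self]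
        congr 1
        omega
    · -- odd index, query out of range: nothing changes
      refine ⟨lo, hi, h1, h2, ?_, ?_⟩
      · simp only [solutionStepB, hpar, if_false, Bool.false_eq_true]
        rw [if_neg hq]
      · simp only [solutionStepA, hpar, if_false, Bool.false_eq_true, hlen]
        rw [if_neg (by omega)]

-- Folding the whole (enumerated) query list preserves the window/offset correspondence.
lemma solution_key (query : List Int) : ∀ (n : Int) (arr : List Int) (lo hi : Nat),
    lo ≤ hi → hi ≤ arr.length →
    ∃ lo' hi' : Nat, lo' ≤ hi' ∧ hi' ≤ arr.length ∧
      (PySem.List.enumerate query n).foldl solutionStepB ((lo : Int), (hi : Int))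
        = ((lo' : Int), (hi' : Int)) ∧
      (PySem.List.enumerate query n).foldl solutionStepA ((arr.drop lo).take (hi - lo))
        = (arr.drop lo').take (hi' - lo') := by
  induction query with
  | nil =>
    intro n arr lo hi h1 h2
    exact ⟨lo, hi, h1, h2, by simp [PySem.List.enumerate], by simp [PySem.List.enumerate]⟩
  | cons q qs ih =>
    intro n arr lo hi h1 h2
    obtain ⟨lo1, hi1, g1, g2, gB, gA⟩ := solution_step arr lo hi n q h1 h2
    rw [PySem.List.enumerate_cons]
    simp only [List.foldl_cons]
    rw [gB, gA]
    exact ih (n + 1) arr lo1 hi1 g1 g2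

-- ===== VERDICT (by name: the statement is the Claim_ definition above) =====
theorem solution_spec : Claim_equal_solution := by
  intro arr query _
  obtain ⟨lo', hi', _, _, hB, hA⟩ :=
    solution_key query 0 arr 0 arr.length (Nat.zero_le _) (le_refl _)
  unfold Spec_solution solution solution_alt
  simp only [Nat.cast_zero] at hB
  rw [hB, PySem.List.slice_natCast]
  simpa using hA
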